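-- pv_equiv track=rewrite | github.com/ylsdamxssjxxdd/wunder | app/tools/availability.py | _resolve_agent_card_list_names
-- ===== SOURCE A (Python) =====
-- from typing import Any, Dict, Iterable, List, Optional, Sequence, Set, Tuple
--
-- def _resolve_agent_card_list_names(items: Any) -> List[str]:
--     """从 AgentCard 列表中提取可读名称。"""
--     if not isinstance(items, list):
--         return []
--     names: List[str] = []
--     seen: Set[str] = set()
--     for item in items:
--         if not isinstance(item, dict):
--             continue
--         raw = str(item.get("name") or item.get("id") or "").strip()
--         if not raw or raw in seen:
--             continue
--         names.append(raw)
--         seen.add(raw)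
--     return names
-- ===== SOURCE B (Python) =====
-- from typing import Any, List
--
-- def _resolve_agent_card_list_names(items: Any) -> List[str]:
--     """从 AgentCard 列表中提取可读名称。"""
--     if not isinstance(items, list):
--         return []
--     pending = [str(item.get("name") or item.get("id") or "").strip()
--                for item in items if isinstance(item, dict)]
--     names: List[str] = []
--     while pending:
--         head = pending[0]
--         rest = pending[1:]
--         if head:
--             names.append(head)
--             pending = [r for r in rest if r != head]
--         else:
--             pending = rest
--     return names
-- ===== Notes on version B (the rewrite author's own statement) =====
-- stated objective: alternative
-- what changed: Dedup by repeatedly taking the first pending name and filtering all its later duplicates out of the remaining work list, instead of A's single pass with a seen-set; trades the auxiliary set for quadratic tail filtering.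
import Mathlib
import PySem

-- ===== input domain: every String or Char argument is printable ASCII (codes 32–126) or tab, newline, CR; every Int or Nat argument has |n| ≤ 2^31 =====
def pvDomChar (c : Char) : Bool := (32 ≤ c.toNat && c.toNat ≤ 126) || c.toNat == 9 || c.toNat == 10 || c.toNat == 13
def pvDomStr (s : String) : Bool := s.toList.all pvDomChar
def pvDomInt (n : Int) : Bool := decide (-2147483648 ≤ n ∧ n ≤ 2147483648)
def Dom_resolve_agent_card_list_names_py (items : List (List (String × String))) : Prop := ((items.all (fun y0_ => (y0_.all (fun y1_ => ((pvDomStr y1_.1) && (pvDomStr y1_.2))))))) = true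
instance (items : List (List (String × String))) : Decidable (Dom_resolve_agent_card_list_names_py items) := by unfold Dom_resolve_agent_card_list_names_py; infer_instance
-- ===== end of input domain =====

-- B replaces A's single pass with a seen-set by a work-list loop that takes the first pending
-- name and filters all its later duplicates out of the remaining work list (no seen structure);
-- same return value, different (quadratic) algorithm. (Under the typed domain every element is
-- a dict, so the isinstance guards are vacuous.)

-- shared helper: str(item.get("name") or item.get("id") or "").strip() — identical expression in both sources
def pvRawName (d : List (String × String)) : String :=
  PySem.Str.strip
    (let n := (PySem.Dict.get? (PySem.Dict.mk d) "name").getD ""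
     if n ≠ "" then n else (PySem.Dict.get? (PySem.Dict.mk d) "id").getD "")

-- ===== PORT A =====
-- the body of A's for-loop: skip non-dicts is vacuous; skip empty/seen raw, else append to names and seen
def pvStepA (st : List String × PySem.Set String) (item : List (String × String)) :
    List String × PySem.Set String :=
  let raw := pvRawName item
  if raw = "" ∨ PySem.Set.contains st.2 raw then st
  else (st.1 ++ [raw], PySem.Set.add st.2 raw)

def resolve_agent_card_list_names_py (items : List (List (String × String))) : List String :=
  (items.foldl pvStepA ([], PySem.Set.empty)).1

-- ===== PORT B =====
-- B's while-loop over the pending work list: pop the head; if non-empty emit it and filter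
-- its duplicates out of the rest, else just drop it.
def pvAltLoop : List String → List String
  | [] => []
  | h :: t =>
    if h = "" then pvAltLoop t
    else h :: pvAltLoop (t.filter (fun r => r ≠ h))
termination_by l => l.length
decreasing_by
  · simp
  · simp only [List.length_unattach, List.length_cons]
    exact Nat.lt_succ_of_le (le_trans (List.length_filter_le _ _) (by simp))

def resolve_agent_card_list_names_py_alt (items : List (List (String × String))) : List String :=
  pvAltLoop (items.map pvRawName)

-- ===== PRECONDITION & SPEC =====
def Spec_resolve_agent_card_list_names_py (items : List (List (String × String))) (out : List String) : Prop := out = resolve_agent_card_list_names_py_alt items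
instance (items : List (List (String × String))) (out : List String) : Decidable (Spec_resolve_agent_card_list_names_py items out) := by unfold Spec_resolve_agent_card_list_names_py; infer_instance

-- ===== CLAIM =====
def Claim_equal_resolve_agent_card_list_names_py : Prop := ∀ (items : List (List (String × String))), Dom_resolve_agent_card_list_names_py items → Spec_resolve_agent_card_list_names_py items (resolve_agent_card_list_names_py items)

-- ===== LEMMAS AND PROOFS =====

lemma pv_contains_add (s : PySem.Set String) (r x : String) (h : PySem.Set.contains s r = false) :
    PySem.Set.contains (PySem.Set.add s r) x = (PySem.Set.contains s x || x == r) := by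
  have hr : r ∉ s := by simpa [PySem.Set.contains] using h
  by_cases hx : x ∈ s <;> by_cases hxr : x = r <;>
    simp_all [PySem.Set.add, PySem.Set.contains, List.mem_append]

lemma pv_loop_eq (items : List (List (String × String))) :
    ∀ (a : List String) (s : PySem.Set String),
    (items.foldl pvStepA (a, s)).1
      = a ++ pvAltLoop ((items.map pvRawName).filter
          (fun r => !(PySem.Set.contains s r))) := by
  induction items with
  | nil => intro a s; simp only [List.foldl_nil, List.map_nil, List.filter_nil]
           rw [pvAltLoop]; simp
  | cons item rest ih =>
    intro a s
    simp only [List.foldl_cons, List.map_cons, List.filter_cons]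
    cases hc : PySem.Set.contains s (pvRawName item) with
    | true =>
      have hmem : pvRawName item ∈ s := by simpa [PySem.Set.contains] using hc
      rw [show pvStepA (a, s) item = (a, s) by simp [pvStepA, hmem]]
      simp only [Bool.not_true, Bool.false_eq_true, if_false]
      exact ih a s
    | false =>
      have hmem : pvRawName item ∉ s := by simpa [PySem.Set.contains] using hc
      simp only [Bool.not_false, if_true]
      by_cases h0 : pvRawName item = ""
      · rw [show pvStepA (a, s) item = (a, s) by simp [pvStepA, h0]]
        rw [ih a s, h0, pvAltLoop]
        simp
      · rw [show pvStepA (a, s) item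
            = (a ++ [pvRawName item], PySem.Set.add s (pvRawName item)) by
          simp [pvStepA, h0, hmem]]
        rw [ih (a ++ [pvRawName item]) (PySem.Set.add s (pvRawName item))]
        conv_rhs => rw [pvAltLoop]
        rw [if_neg h0, List.filter_filter, List.append_assoc]
        simp only [List.singleton_append]
        congr 2
        refine congrArg pvAltLoop ?_
        apply List.filter_congr
        intro x _
        rw [pv_contains_add s (pvRawName item) x hc]
        cases hx : PySem.Set.contains s x <;> cases hr : x == pvRawName item <;>
          simp_all

-- ===== VERDICT =====
theorem resolve_agent_card_list_names_py_spec : Claim_equal_resolve_agent_card_list_names_py := by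
  intro items _
  unfold Spec_resolve_agent_card_list_names_py resolve_agent_card_list_names_py
    resolve_agent_card_list_names_py_alt
  rw [pv_loop_eq items [] PySem.Set.empty]
  simp [PySem.Set.empty, PySem.Set.contains]
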